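-- pv_equiv track=rewrite | github.com/Xgcabellos/EnterpriseKnowledge | email_process.py | forbidden
-- ===== SOURCE A (Python) =====
-- FORBIDDEN_FOLDER = {'NOSELECT', 'TRASH', 'JUNK', 'SPAM', 'DRAFT', 'ALL', 'CHATS', 'SCHEDULED', 'MAKED', 'TEMPLATE',
--                     'RSS'}
--
-- FORBIDDEN_FOLDER_BY_LANGUAGE = {'BORRADORES', 'PAPELERA', 'CORREO ELECTR&APM-NICO NO DESEADO', 'CALENDARIO',
--                                 'TODOS', 'IMPORTANTES', 'PROGRAMADOS', 'DESTACADOS', 'CONTACTOS', 'NO DESEADO',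
--                                 'ELIMINADOS', 'TASKS', 'TAREAS', 'BORRADORES', 'SINCRONI'}
--
-- def forbidden(folder):
--     # name_folder = str(folder).split('"')[ -2 ]
--     name_folder = str(folder).split('"/"')[-1]
--     # be careful - with google is not exactly the same. verify.
--
--     name_folder = name_folder.replace('\'', '').replace('"', '').strip()
--     # Standards element to leave without read
--     words = name_folder.split('/')
--     forbidden = False
--     for w in words:
--         # module_logger.debug('Folder:'+str(w))
--         if any(FORBID in w.upper() for FORBID in FORBIDDEN_FOLDER):  # (w.upper() in FORBIDDEN_FOLDER)
--             forbidden = True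
--             # continue
--         # by language. BE CAREFUL it must to know the language
--         if any(FORBIDL in w.upper() for FORBIDL in
--                FORBIDDEN_FOLDER_BY_LANGUAGE):  # (w.upper() in FORBIDDEN_FOLDER_BY_LANGUAGE)
--             forbidden = True
--             # continue
--             # by language. BE CAREFUL it must to know the language
--         if ('[' in w.upper()):
--             continue
--         ########################################################################################
--         ## be careful TEMPORAL. just for minimize the number of folders...
--         # if any(FORBIDT   not in w.upper()  for FORBIDT in TEMPORAL_RUN_FOLDER):
--         #    forbidden = True
--         # else:
--         #     forbidden = False
--         #     #continue
--         ########################################################################################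
--         # module_logger.debug('Folder:' + str(w) + ' :forbidden=' + str(forbidden))
--         if forbidden == True:
--             return True
--
--     return forbidden
-- ===== SOURCE B (Python) =====
-- FORBIDDEN_FOLDER = {'NOSELECT', 'TRASH', 'JUNK', 'SPAM', 'DRAFT', 'ALL', 'CHATS', 'SCHEDULED', 'MAKED', 'TEMPLATE',
--                     'RSS'}
--
-- FORBIDDEN_FOLDER_BY_LANGUAGE = {'BORRADORES', 'PAPELERA', 'CORREO ELECTR&APM-NICO NO DESEADO', 'CALENDARIO',
--                                 'TODOS', 'IMPORTANTES', 'PROGRAMADOS', 'DESTACADOS', 'CONTACTOS', 'NO DESEADO',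
--                                 'ELIMINADOS', 'TASKS', 'TAREAS', 'BORRADORES', 'SINCRONI'}
--
--
-- def forbidden(folder):
--     # No keyword contains '/', so searching the whole uppercased name is
--     # equivalent to A's split-on-'/'-then-scan-each-word flag loop.
--     name = str(folder).split('"/"')[-1].replace("'", "").replace('"', "").strip().upper()
--     return any(k in name for k in FORBIDDEN_FOLDER | FORBIDDEN_FOLDER_BY_LANGUAGE)
-- ===== Notes on version B (the rewrite author's own statement) =====
-- stated objective: faster
-- what changed: Replaced A's split-on-'/' word loop with its forbidden flag, bracket-continue and early return by a single any() substring scan of every keyword against the whole uppercased name (valid because no keyword contains '/').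
import Mathlib
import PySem

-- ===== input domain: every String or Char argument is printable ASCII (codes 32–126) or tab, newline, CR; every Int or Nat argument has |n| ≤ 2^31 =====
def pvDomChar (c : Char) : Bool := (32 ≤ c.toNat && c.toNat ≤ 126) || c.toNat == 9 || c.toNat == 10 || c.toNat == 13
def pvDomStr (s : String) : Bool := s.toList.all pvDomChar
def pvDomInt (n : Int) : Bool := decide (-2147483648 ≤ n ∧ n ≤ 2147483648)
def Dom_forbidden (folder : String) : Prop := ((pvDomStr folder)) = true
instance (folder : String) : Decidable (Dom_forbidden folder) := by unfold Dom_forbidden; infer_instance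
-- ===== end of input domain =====

-- B replaces A's split-on-'/' word loop (flag + '[' continue + early return) by one any()
-- substring scan of all keywords against the whole uppercased name; valid since no keyword contains a slash.

-- ===== PORT A =====
def FORBIDDEN_FOLDER : List String :=
  PySem.Set.ofList ["NOSELECT", "TRASH", "JUNK", "SPAM", "DRAFT", "ALL", "CHATS", "SCHEDULED", "MAKED",
    "TEMPLATE", "RSS"]

def FORBIDDEN_FOLDER_BY_LANGUAGE : List String :=
  PySem.Set.ofList ["BORRADORES", "PAPELERA", "CORREO ELECTR&APM-NICO NO DESEADO", "CALENDARIO",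
    "TODOS", "IMPORTANTES", "PROGRAMADOS", "DESTACADOS", "CONTACTOS", "NO DESEADO",
    "ELIMINADOS", "TASKS", "TAREAS", "BORRADORES", "SINCRONI"]

-- the 'for w in words' loop of A, with its forbidden flag, '[' continue and early return
def forbiddenLoop (words : List String) (f : Bool) : Bool :=
  match words with
  | [] => f
  | w :: ws =>
    let f1 := if FORBIDDEN_FOLDER.any (fun k => PySem.Str.isIn k (PySem.Str.upper w)) then true else f
    let f2 := if FORBIDDEN_FOLDER_BY_LANGUAGE.any (fun k => PySem.Str.isIn k (PySem.Str.upper w)) then true else f1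
    if PySem.Str.isIn "[" (PySem.Str.upper w) then forbiddenLoop ws f2
    else if f2 then true
    else forbiddenLoop ws f2

def forbidden (folder : String) : Bool :=
  -- str(folder).split('"/"')[-1]  (split by a nonempty separator always yields a nonempty list)
  let name_folder := (PySem.List.pyGet? ((PySem.Str.split? folder "\"/\"").getD []) (-1)).getD ""
  let name_folder := PySem.Str.strip (PySem.Str.replace (PySem.Str.replace name_folder "'" "") "\"" "")
  let words := (PySem.Str.split? name_folder "/").getD []
  forbiddenLoop words false

-- ===== PORT B =====
def forbidden_alt (folder : String) : Bool :=
  let name := (PySem.List.pyGet? ((PySem.Str.split? folder "\"/\"").getD []) (-1)).getD ""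
  let name := PySem.Str.upper (PySem.Str.strip (PySem.Str.replace (PySem.Str.replace name "'" "") "\"" ""))
  (PySem.Set.union FORBIDDEN_FOLDER FORBIDDEN_FOLDER_BY_LANGUAGE).any (fun k => PySem.Str.isIn k name)

-- ===== PRECONDITION & SPEC =====
def Spec_forbidden (folder : String) (out : Bool) : Prop := out = forbidden_alt folder
instance (folder : String) (out : Bool) : Decidable (Spec_forbidden folder out) := by unfold Spec_forbidden; infer_instance

-- ===== CLAIM (what is proved, stated in full; the proofs are below) =====
def Claim_equal_forbidden : Prop := ∀ (folder : String), Dom_forbidden folder → Spec_forbidden folder (forbidden folder)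

-- ===== LEMMAS AND PROOFS =====

-- per-word match used to summarise A's loop
def pvWMatch (w : String) : Bool :=
  FORBIDDEN_FOLDER.any (fun k => PySem.Str.isIn k (PySem.Str.upper w)) ||
  FORBIDDEN_FOLDER_BY_LANGUAGE.any (fun k => PySem.Str.isIn k (PySem.Str.upper w))

theorem forbiddenLoop_eq (words : List String) (f : Bool) :
    forbiddenLoop words f = (f || words.any pvWMatch) := by
  induction words generalizing f with
  | nil => simp [forbiddenLoop]
  | cons w ws ih =>
    rw [forbiddenLoop]
    simp only [List.any_cons]
    cases hF : FORBIDDEN_FOLDER.any (fun k => PySem.Str.isIn k (PySem.Str.upper w)) <;>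
    cases hL : FORBIDDEN_FOLDER_BY_LANGUAGE.any (fun k => PySem.Str.isIn k (PySem.Str.upper w)) <;>
    cases f <;>
    cases hB : PySem.Str.isIn "[" (PySem.Str.upper w) <;>
    simp only [hF, hL, pvWMatch, if_true, ih, Bool.false_or, Bool.true_or,
      Bool.or_false, Bool.or_true] <;> rfl

theorem union_keys :
    PySem.Set.union FORBIDDEN_FOLDER FORBIDDEN_FOLDER_BY_LANGUAGE =
      FORBIDDEN_FOLDER ++ FORBIDDEN_FOLDER_BY_LANGUAGE := by decide

-- prefix through an inserted separator: a word without c is a prefix of xs ++ c :: ys iff of xs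
theorem prefix_append_sep {k xs ys : List Char} {c : Char} (hc : c ∉ k) :
    k <+: xs ++ c :: ys ↔ k <+: xs := by
  induction k generalizing xs with
  | nil => simp
  | cons b k' ih =>
    cases xs with
    | nil =>
      simp only [List.nil_append, List.cons_prefix_cons]
      constructor
      · rintro ⟨rfl, -⟩; exact absurd (List.mem_cons_self) hc
      · rintro h; exact absurd h (by simp)
    | cons x xs' =>
      simp only [List.cons_append, List.cons_prefix_cons]
      exact and_congr_right fun _ => ih (fun h => hc (List.mem_cons_of_mem _ h))

theorem infix_append_sep {k xs ys : List Char} {c : Char} (hc : c ∉ k) :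
    k <:+: xs ++ c :: ys ↔ (k <:+: xs ∨ k <:+: ys) := by
  induction xs with
  | nil =>
    simp only [List.nil_append, List.infix_cons_iff]
    constructor
    · rintro (h | h)
      · cases k with
        | nil => exact Or.inl List.nil_infix
        | cons b k' =>
          rw [List.cons_prefix_cons] at h
          exact absurd h.1 (fun hbc => hc (hbc ▸ List.mem_cons_self))
      · exact Or.inr h
    · rintro (h | h)
      · rw [List.infix_nil] at h; subst h; exact Or.inl List.nil_prefix
      · exact Or.inr h
  | cons x xs' ih =>
    rw [List.cons_append, List.infix_cons_iff, ih, List.infix_cons_iff,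
      ← List.cons_append, prefix_append_sep hc]
    exact or_assoc.symm

theorem intercalate_cons₂ (s x y : List Char) (zs : List (List Char)) :
    List.intercalate s (x :: y :: zs) = x ++ s ++ List.intercalate s (y :: zs) := by
  simp [List.intercalate, List.intersperse]

theorem infix_intercalate {k : List Char} {c : Char} (hc : c ∉ k) :
    ∀ (ps : List (List Char)), ps ≠ [] →
      (k <:+: List.intercalate [c] ps ↔ ∃ p ∈ ps, k <:+: p)
  | [], h => absurd rfl h
  | [p], _ => by simp [List.intercalate]
  | p :: q :: ps, _ => by
    rw [intercalate_cons₂, List.append_assoc, List.singleton_append, infix_append_sep hc,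
      infix_intercalate hc (q :: ps) (by simp)]
    simp

theorem map_intercalate (f : Char → Char) (c : Char) (hf : f c = c) :
    ∀ (ps : List (List Char)),
      List.map f (List.intercalate [c] ps) = List.intercalate [c] (ps.map (List.map f))
  | [] => by simp [List.intercalate]
  | [p] => by simp [List.intercalate]
  | p :: q :: ps => by
    rw [intercalate_cons₂]
    simp only [List.map_append, List.map_cons, List.map_nil]
    rw [map_intercalate f c hf (q :: ps), intercalate_cons₂]
    simp [hf]

-- PySem's fueled splitOn on a one-char separator computes Mathlib's List.splitOn
theorem splitOn_go_spec (c : Char) :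
    ∀ (fuel : Nat) (l cur : List Char) (acc : List (List Char)), l.length < fuel →
      PySem.Chars.splitOn.go [c] fuel l cur acc =
        acc.reverse ++ List.modifyHead (fun t => cur.reverse ++ t) (List.splitOnP (· == c) l)
  | 0, _, _, _, h => absurd h (by omega)
  | fuel + 1, [], cur, acc, _ => by
    simp [PySem.Chars.splitOn.go, List.splitOnP_nil, List.modifyHead]
  | fuel + 1, a :: rest, cur, acc, h => by
    rw [PySem.Chars.splitOn.go]
    by_cases hac : c = a
    · subst hac
      have hpre : List.isPrefixOf [c] (c :: rest) = true := by simp [List.isPrefixOf]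
      rw [if_pos hpre,
        show List.drop [c].length (c :: rest) = rest from rfl,
        splitOn_go_spec c fuel rest [] (cur.reverse :: acc)
          (by simpa using Nat.lt_of_succ_lt_succ h)]
      cases hps : List.splitOnP (fun x => x == c) rest with
      | nil => exact absurd hps (List.splitOnP_ne_nil _ _)
      | cons p ps => simp [List.splitOnP_cons, hps, List.modifyHead]
    · have hpre : List.isPrefixOf [c] (a :: rest) = false := by
        simp [List.isPrefixOf]; exact hac
      rw [if_neg (by simp [hpre]),
        splitOn_go_spec c fuel rest (a :: cur) acc (by simpa using Nat.lt_of_succ_lt_succ h)]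
      have hac2 : (a == c) = false := by
        simp only [beq_eq_false_iff_ne, ne_eq]; exact fun hh => hac hh.symm
      cases hps : List.splitOnP (fun x => x == c) rest with
      | nil => exact absurd hps (List.splitOnP_ne_nil _ _)
      | cons p ps => simp [List.splitOnP_cons, hps, hac2, List.modifyHead]

theorem splitOn_char_eq (c : Char) (s : List Char) :
    PySem.Chars.splitOn s [c] = List.splitOn c s := by
  rw [PySem.Chars.splitOn, splitOn_go_spec c (s.length + 1) s [] [] (by omega)]
  cases hps : List.splitOnP (fun x => x == c) s with
  | nil => exact absurd hps (List.splitOnP_ne_nil _ _)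
  | cons p ps => simp [List.splitOn, hps, List.modifyHead]

-- the heart of the equivalence: a '/'-free word is an infix of upper(s) iff it is an
-- infix of upper(w) for some piece w of s.split('/')
theorem infix_upper_splitOn {k : List Char} (hk : '/' ∉ k) (s : List Char) :
    (∃ w ∈ PySem.Chars.splitOn s ['/'], k <:+: PySem.Chars.upper w) ↔
      k <:+: PySem.Chars.upper s := by
  have hs : s = List.intercalate ['/'] (List.splitOn '/' s) := (List.intercalate_splitOn s '/').symm
  have hne : List.splitOn '/' s ≠ [] := by rw [List.splitOn]; exact List.splitOnP_ne_nil _ _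
  constructor
  · rintro ⟨w, hw, hkw⟩
    rw [splitOn_char_eq] at hw
    conv_rhs => rw [hs]
    rw [PySem.Chars.upper, map_intercalate _ _ rfl,
      infix_intercalate hk _ (by simpa using hne)]
    exact ⟨List.map PySem.Chars.upperChar w, List.mem_map_of_mem hw, hkw⟩
  · intro hksh
    rw [hs, PySem.Chars.upper, map_intercalate _ _ rfl,
      infix_intercalate hk _ (by simpa using hne)] at hksh
    obtain ⟨q, hq, hkq⟩ := hksh
    obtain ⟨w, hw, rfl⟩ := List.mem_map.mp hq
    exact ⟨w, by rwa [splitOn_char_eq], hkq⟩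

theorem keys_no_slash :
    ∀ k ∈ FORBIDDEN_FOLDER ++ FORBIDDEN_FOLDER_BY_LANGUAGE, '/' ∉ k.toList := by decide

-- any over the words of nm.split('/') equals any over the whole uppercased nm
theorem any_words_eq (nm : String) :
    (((PySem.Str.split? nm "/").getD []).any pvWMatch) =
      ((FORBIDDEN_FOLDER ++ FORBIDDEN_FOLDER_BY_LANGUAGE).any
        (fun k => PySem.Str.isIn k (PySem.Str.upper nm))) := by
  have hmap := PySem.Str.split?_map nm "/"
  have hch : PySem.Chars.split? nm.toList "/".toList =
      some (PySem.Chars.splitOn nm.toList ['/']) := by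
    simp [PySem.Chars.split?]
  rw [hch] at hmap
  obtain ⟨ws, hws, hmapws⟩ := Option.map_eq_some_iff.mp hmap
  rw [hws, Option.getD_some]
  have key : ∀ w : String, pvWMatch w =
      (FORBIDDEN_FOLDER ++ FORBIDDEN_FOLDER_BY_LANGUAGE).any
        (fun k => PySem.Str.isIn k (PySem.Str.upper w)) := by
    intro w; simp [pvWMatch, List.any_append]
  rw [funext key]
  rw [Bool.eq_iff_iff]
  simp only [List.any_eq_true]
  constructor
  · rintro ⟨w, hw, k, hk, hkw⟩
    refine ⟨k, hk, ?_⟩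
    rw [PySem.Str.isIn_iff_infix, PySem.Str.toList_upper]
    rw [PySem.Str.isIn_iff_infix, PySem.Str.toList_upper] at hkw
    rw [← infix_upper_splitOn (keys_no_slash k hk) nm.toList]
    exact ⟨w.toList, by rw [← hmapws]; exact List.mem_map_of_mem hw, hkw⟩
  · rintro ⟨k, hk, hknm⟩
    rw [PySem.Str.isIn_iff_infix, PySem.Str.toList_upper] at hknm
    rw [← infix_upper_splitOn (keys_no_slash k hk) nm.toList] at hknm
    obtain ⟨wl, hwl, hkwl⟩ := hknm
    rw [← hmapws] at hwl
    obtain ⟨w, hw, rfl⟩ := List.mem_map.mp hwl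
    exact ⟨w, hw, k, hk, by rw [PySem.Str.isIn_iff_infix, PySem.Str.toList_upper]; exact hkwl⟩

-- ===== VERDICT (by name: the statement is the Claim_ definition above) =====
theorem forbidden_spec : Claim_equal_forbidden := by
  intro folder _
  unfold Spec_forbidden forbidden forbidden_alt
  rw [forbiddenLoop_eq, union_keys, Bool.false_or, any_words_eq]
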